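-- pv_equiv track=rewrite | github.com/Shellbye/leetcode-python | 541.py | reverseStr
-- ===== SOURCE A (Python) =====
-- def reverseStr(s, k):
--     """
--     :type s: str
--     :type k: int
--     :rtype: str
--     """
--     if k == 0:
--         return s
--     ans = ""
--     turn = 0
--     for i in range(0, len(s), k):
--         if turn % 2 != 0:
--             ans = ans + s[i:i+k]
--         else:
--             ans = ans + s[i:i+k][::-1]
--         turn = turn + 1
--     return ans
-- ===== SOURCE B (Python) =====
-- def reverseStr(s, k):
--     if k <= 0:
--         return s
--     n = len(s)
--     w = 2 * k
--     out = []
--     for j in range(n):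
--         r = j % w
--         if r < k:
--             base = j - r
--             end = min(base + k, n)
--             out.append(s[base + end - 1 - j])
--         else:
--             out.append(s[j])
--     return "".join(out)
-- ===== Notes on version B (the rewrite author's own statement) =====
-- stated objective: alternative
-- what changed: B replaces A's chunk-slice-reverse-and-concatenate loop by a single pass over character positions that computes each output character directly from a closed-form index mapping (position j in a reversed half-window reads s[base+end-1-j], otherwise s[j]), joining the characters once.
-- intended difference: For k < 0 on a nonempty string A returns '' because range(0, len(s), k) is accidentally empty, while B treats a nonpositive k as a no-op and returns s unchanged, the intended behaviour for a meaningless block size. — e.g. on reverseStr("ab", -1): A returns "", B returns "ab"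
import Mathlib
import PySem

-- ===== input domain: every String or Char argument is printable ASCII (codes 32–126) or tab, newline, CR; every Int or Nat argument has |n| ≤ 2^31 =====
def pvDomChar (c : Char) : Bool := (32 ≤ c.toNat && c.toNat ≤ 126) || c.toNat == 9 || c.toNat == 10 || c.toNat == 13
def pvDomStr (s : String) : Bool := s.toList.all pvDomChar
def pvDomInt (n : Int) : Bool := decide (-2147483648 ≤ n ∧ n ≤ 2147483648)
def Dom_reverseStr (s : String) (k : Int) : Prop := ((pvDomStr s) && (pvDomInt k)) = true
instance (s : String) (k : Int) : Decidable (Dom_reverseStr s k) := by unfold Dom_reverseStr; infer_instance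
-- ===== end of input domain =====

-- B computes each output character directly by a closed-form index mapping (one pass, no slicing
-- or reversal); on k < 0 with nonempty s it intentionally returns s where A returns "" (see D_).

-- ===== PORT A =====
-- A's loop: ans/turn state over range(0, len(s), k); s[i:i+k][::-1] is the reversed slice.
def revStrLoopA (l : List Char) (k : Int) : List Char :=
  ((PySem.List.pyRange 0 (l.length : Int) k).foldl
    (fun (st : List Char × Int) i =>
      if PySem.Int.mod st.2 2 ≠ 0 then
        (st.1 ++ PySem.List.slice l (some i) (some (i + k)), st.2 + 1)
      else
        (st.1 ++ (PySem.List.slice l (some i) (some (i + k))).reverse, st.2 + 1))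
    ([], 0)).1

def reverseStr (s : String) (k : Int) : String :=
  if k = 0 then s else String.ofList (revStrLoopA s.toList k)

-- ===== PORT B =====
-- B's loop body: for index j, the source character s[base+end-1-j] (reversed half-window) or s[j].
-- The index handed to pyGetD is always in range when 0 < k (proved below), so the ' ' default is never used.
def bChar (l : List Char) (k : Int) (j : Int) : Char :=
  let r := PySem.Int.mod j (2 * k)
  if r < k then
    let base := j - r
    let e := min (base + k) (l.length : Int)
    PySem.List.pyGetD l (base + e - 1 - j) ' '
  else
    PySem.List.pyGetD l j ' '

def revStrLoopB (l : List Char) (k : Int) : List Char :=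
  (PySem.List.pyRange 0 (l.length : Int) 1).foldl (fun out j => out ++ [bChar l k j]) []

def reverseStr_alt (s : String) (k : Int) : String :=
  if k ≤ 0 then s else String.ofList (revStrLoopB s.toList k)

-- ===== PRECONDITION & SPEC =====
-- On k < 0 with s nonempty, A returns "" (an accident: range(0, len(s), k) is empty), while B
-- treats a nonpositive k as a no-op and returns s unchanged, the intended behaviour.
def D_reverseStr (s : String) (k : Int) : Prop := k < 0 ∧ s ≠ ""
instance (s : String) (k : Int) : Decidable (D_reverseStr s k) := by unfold D_reverseStr; infer_instance

def Spec_reverseStr (s : String) (k : Int) (out : String) : Prop := ¬ D_reverseStr s k → out = reverseStr_alt s k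
instance (s : String) (k : Int) (out : String) : Decidable (Spec_reverseStr s k out) := by unfold Spec_reverseStr; infer_instance

def pvDiffWitness_reverseStr : String × Int := ("ab", -1)
def pvDiffWitnessOut_reverseStr : String × String := ("", "ab")

-- ===== CLAIM (what is proved, stated in full; the proofs are below) =====
def Claim_unchanged_reverseStr : Prop := ∀ (s : String) (k : Int), Dom_reverseStr s k → Spec_reverseStr s k (reverseStr s k)
def Claim_changed_reverseStr : Prop := Dom_reverseStr (pvDiffWitness_reverseStr.1) (pvDiffWitness_reverseStr.2) ∧ D_reverseStr (pvDiffWitness_reverseStr.1) (pvDiffWitness_reverseStr.2) ∧ reverseStr (pvDiffWitness_reverseStr.1) (pvDiffWitness_reverseStr.2) = pvDiffWitnessOut_reverseStr.1 ∧ reverseStr_alt (pvDiffWitness_reverseStr.1) (pvDiffWitness_reverseStr.2) = pvDiffWitnessOut_reverseStr.2 ∧ pvDiffWitnessOut_reverseStr.1 ≠ pvDiffWitnessOut_reverseStr.2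
def Claim_exact_reverseStr : Prop := ∀ (s : String) (k : Int), Dom_reverseStr s k → D_reverseStr s k → reverseStr s k ≠ reverseStr_alt s k

-- ===== LEMMAS AND PROOFS =====

-- abstract form of A's per-index output (t = turn)
def goA (k : Int) (l : List Char) : List Int → Int → List Char
  | [], _ => []
  | i :: r, t =>
    (if PySem.Int.mod t 2 ≠ 0 then (l.drop i.toNat).take k.toNat
     else ((l.drop i.toNat).take k.toNat).reverse) ++ goA k l r (t + 1)

-- chunk form shared by both directions of the proof
def goB (k : Int) (l : List Char) (r : List Int) : List Char :=
  r.flatMap (fun i =>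
    ((l.drop i.toNat).take k.toNat).reverse ++ ((l.drop (i.toNat + k.toNat)).take k.toNat))

theorem slice_chunk (l : List Char) {i k : Int} (hi : 0 ≤ i) (hk : 0 ≤ k) :
    PySem.List.slice l (some i) (some (i + k)) = (l.drop i.toNat).take k.toNat := by
  rw [PySem.List.slice_toNat l hi (by omega)]
  congr 1
  omega

theorem pyRange_pos_nil {a b s : Int} (hs : 0 < s) (h : b ≤ a) :
    PySem.List.pyRange a b s = [] := by
  rw [PySem.List.pyRange_of_pos a b hs, if_neg (by omega)]
  simp

theorem pyRange_pos_cons {a b s : Int} (hs : 0 < s) (h : a < b) :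
    PySem.List.pyRange a b s = a :: PySem.List.pyRange (a + s) b s := by
  rw [PySem.List.pyRange_of_pos a b hs, PySem.List.pyRange_of_pos (a + s) b hs, if_pos h]
  have key : (b - a + s - 1) / s = (if a + s < b then ((b - (a + s) + s - 1) / s) else 0) + 1 := by
    have h1 : b - a + s - 1 = (b - a - 1) + 1 * s := by ring
    rw [h1, Int.add_mul_ediv_right _ _ (by omega)]
    split_ifs with h2
    · have h3 : b - (a + s) + s - 1 = b - a - 1 := by ring
      rw [h3]
    · have : (b - a - 1) / s = 0 := Int.ediv_eq_zero_of_lt (by omega) (by omega)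
      omega
  have hq : 0 ≤ if a + s < b then ((b - (a + s) + s - 1) / s) else 0 := by
    split_ifs with h2
    · exact Int.ediv_nonneg (by omega) (by omega)
    · exact le_refl 0
  have hcnt : ((b - a + s - 1) / s).toNat
      = (if a + s < b then ((b - (a + s) + s - 1) / s).toNat else 0) + 1 := by
    rw [key]
    split_ifs with h2 <;> omega
  rw [hcnt, List.range_succ_eq_map]
  simp only [List.map_cons, List.map_map, Nat.cast_zero, mul_zero, add_zero]
  congr 1
  apply List.map_congr_left
  intro x _
  simp only [Function.comp_apply]
  push_cast
  ring

theorem pyRange_shift {a b s : Int} (c : Int) (hs : 0 < s) :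
    PySem.List.pyRange (a + c) (b + c) s = (PySem.List.pyRange a b s).map (· + c) := by
  rw [PySem.List.pyRange_of_pos _ _ hs, PySem.List.pyRange_of_pos a b hs]
  by_cases hab : a < b
  · rw [if_pos (by omega : a + c < b + c), if_pos hab]
    have h1 : b + c - (a + c) + s - 1 = b - a + s - 1 := by ring
    rw [h1, List.map_map]
    apply List.map_congr_left
    intro x _
    simp only [Function.comp_apply]
    ring
  · rw [if_neg (by omega : ¬ (a + c < b + c)), if_neg hab]
    simp

theorem mem_pyRange_pos_nonneg {b s x : Int} (hs : 0 < s) (hx : x ∈ PySem.List.pyRange 0 b s) :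
    0 ≤ x := by
  have := (PySem.List.mem_pyRange_iff_of_pos hs x).1 hx
  omega

theorem goA_parity (k : Int) (l : List Char) (r : List Int) :
    ∀ t, goA k l r (t + 2) = goA k l r t := by
  induction r with
  | nil => intro t; rfl
  | cons i r ih =>
    intro t
    have hm : PySem.Int.mod (t + 2) 2 = PySem.Int.mod t 2 := by
      rw [PySem.Int.mod_eq_emod_of_pos (by omega), PySem.Int.mod_eq_emod_of_pos (by omega)]
      omega
    simp only [goA, hm]
    have h2 : t + 2 + 1 = t + 1 + 2 := by ring
    rw [h2, ih]

theorem goA_shift (k : Int) (l : List Char) {c : Int} (hc : 0 ≤ c) (r : List Int)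
    (hr : ∀ i ∈ r, 0 ≤ i) : ∀ t, goA k l (r.map (· + c)) t = goA k (l.drop c.toNat) r t := by
  induction r with
  | nil => intro t; rfl
  | cons i r ih =>
    intro t
    have hi : 0 ≤ i := hr i (by simp)
    have hd : l.drop (i + c).toNat = (l.drop c.toNat).drop i.toNat := by
      rw [List.drop_drop]
      congr 1
      omega
    simp only [List.map_cons, goA, hd]
    rw [ih (fun j hj => hr j (by simp [hj]))]

theorem goB_shift (k : Int) (l : List Char) {c : Int} (hc : 0 ≤ c) (r : List Int)
    (hr : ∀ i ∈ r, 0 ≤ i) : goB k l (r.map (· + c)) = goB k (l.drop c.toNat) r := by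
  induction r with
  | nil => rfl
  | cons i r ih =>
    have hi : 0 ≤ i := hr i (by simp)
    have hd : l.drop (i + c).toNat = (l.drop c.toNat).drop i.toNat := by
      rw [List.drop_drop]; congr 1; omega
    have hd2 : l.drop ((i + c).toNat + k.toNat) = (l.drop c.toNat).drop (i.toNat + k.toNat) := by
      rw [List.drop_drop]; congr 1; omega
    simp only [goB, List.map_cons, List.flatMap_cons, hd, hd2]
    have := ih (fun j hj => hr j (by simp [hj]))
    simp only [goB] at this
    rw [this]

theorem foldA_eq (l : List Char) {k : Int} (hk : 0 < k) :
    ∀ (r : List Int), (∀ i ∈ r, 0 ≤ i) → ∀ (ans : List Char) (t : Int),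
    (r.foldl
      (fun (st : List Char × Int) i =>
        if PySem.Int.mod st.2 2 ≠ 0 then
          (st.1 ++ PySem.List.slice l (some i) (some (i + k)), st.2 + 1)
        else
          (st.1 ++ (PySem.List.slice l (some i) (some (i + k))).reverse, st.2 + 1))
      (ans, t)).1 = ans ++ goA k l r t := by
  intro r
  induction r with
  | nil => intro _ ans t; simp [goA]
  | cons i r ih =>
    intro hr ans t
    have hi : 0 ≤ i := hr i (by simp)
    have hs := slice_chunk l hi (le_of_lt hk)
    simp only [List.foldl_cons, goA]
    split_ifs with hm <;>
      · rw [ih (fun j hj => hr j (by simp [hj]))]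
        rw [hs]
        simp

theorem main_lemma : ∀ (N : Nat) (l : List Char) (k : Int), l.length ≤ N → 0 < k →
    goA k l (PySem.List.pyRange 0 (l.length : Int) k) 0
      = goB k l (PySem.List.pyRange 0 (l.length : Int) (2 * k)) := by
  intro N
  induction N with
  | zero =>
    intro l k hl hk
    have hnil : l = [] := List.length_eq_zero_iff.mp (by omega)
    subst hnil
    simp only [List.length_nil, Nat.cast_zero]
    rw [pyRange_pos_nil hk le_rfl, pyRange_pos_nil (by omega) le_rfl]
    rfl
  | succ N ih =>
    intro l k hl hk
    by_cases hn : l.length = 0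
    · rw [hn]
      simp only [Nat.cast_zero]
      rw [pyRange_pos_nil hk le_rfl, pyRange_pos_nil (by omega) le_rfl]
      rfl
    · have hnpos : (0 : Int) < (l.length : Int) := by exact_mod_cast Nat.pos_of_ne_zero hn
      set n : Int := (l.length : Int) with hn_def
      have h2k : (0:Int) < 2 * k := by omega
      have hBr : PySem.List.pyRange 0 n (2 * k)
          = 0 :: (PySem.List.pyRange 0 (n - 2 * k) (2 * k)).map (· + 2 * k) := by
        rw [pyRange_pos_cons h2k hnpos]
        congr 1
        calc PySem.List.pyRange (0 + 2 * k) n (2 * k)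
            = PySem.List.pyRange (0 + 2 * k) ((n - 2 * k) + 2 * k) (2 * k) := by ring_nf
          _ = (PySem.List.pyRange 0 (n - 2 * k) (2 * k)).map (· + 2 * k) :=
              pyRange_shift (2 * k) h2k
      set l' : List Char := l.drop (2 * k).toNat with hl'_def
      have hlen0 : l'.length = l.length - (2 * k).toNat := by
        rw [hl'_def, List.length_drop]
      have hrange_eq : ∀ s : Int, 0 < s →
          PySem.List.pyRange 0 (n - 2 * k) s = PySem.List.pyRange 0 (l'.length : Int) s := by
        intro s hs
        by_cases hcase : n - 2 * k ≤ 0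
        · rw [pyRange_pos_nil hs hcase, pyRange_pos_nil hs (by omega)]
        · have : (l'.length : Int) = n - 2 * k := by omega
          rw [this]
      have hrec_elems : ∀ s : Int, 0 < s → ∀ i ∈ PySem.List.pyRange 0 (n - 2 * k) s, 0 ≤ i :=
        fun s hs i hi => mem_pyRange_pos_nonneg hs hi
      have hl'len : l'.length ≤ N := by omega
      have hIH := ih l' k hl'len hk
      have hm0 : PySem.Int.mod 0 2 = 0 := by decide
      by_cases hkn : k < n
      · have hAr : PySem.List.pyRange 0 n k
            = 0 :: k :: (PySem.List.pyRange 0 (n - 2 * k) k).map (· + 2 * k) := by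
          rw [pyRange_pos_cons hk hnpos]
          congr 1
          rw [show (0:Int) + k = k by ring, pyRange_pos_cons hk hkn]
          congr 1
          calc PySem.List.pyRange (k + k) n k
              = PySem.List.pyRange (0 + 2 * k) ((n - 2 * k) + 2 * k) k := by ring_nf
            _ = (PySem.List.pyRange 0 (n - 2 * k) k).map (· + 2 * k) := pyRange_shift (2 * k) hk
        rw [hAr, hBr]
        simp only [goA, goB, List.flatMap_cons, hm0]
        rw [goA_shift k l (le_of_lt h2k) _ (hrec_elems k hk)]
        have hgb := goB_shift k l (le_of_lt h2k) _ (hrec_elems (2*k) h2k)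
        simp only [goB] at hgb
        rw [hgb]
        rw [hrange_eq k hk, hrange_eq (2*k) h2k]
        have hpar : goA k l' (PySem.List.pyRange 0 (l'.length : Int) k) (0 + 1 + 1)
            = goA k l' (PySem.List.pyRange 0 (l'.length : Int) k) 0 := by
          rw [show (0:Int) + 1 + 1 = 0 + 2 by ring, goA_parity]
        rw [hpar, hIH]
        simp only [goB, hl'_def]
        simp [Int.toNat_zero, List.drop_zero]
      · have hAr : PySem.List.pyRange 0 n k = [0] := by
          rw [pyRange_pos_cons hk hnpos]
          rw [show (0:Int) + k = k by ring, pyRange_pos_nil hk (by omega)]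
        have hB2 : PySem.List.pyRange 0 (n - 2 * k) (2 * k) = [] :=
          pyRange_pos_nil h2k (by omega)
        rw [hAr, hBr, hB2]
        simp only [goA, goB, List.map_nil, List.flatMap_cons, List.flatMap_nil, hm0]
        simp
        omega

theorem pyRange_neg_zero_nil {b s : Int} (hs : s < 0) (hb : 0 ≤ b) :
    PySem.List.pyRange 0 b s = [] := by
  unfold PySem.List.pyRange
  rw [if_neg (by omega : ¬ s = 0)]
  rw [if_neg (by omega : ¬ (0:Int) < s), if_neg (by omega : ¬ b < 0)]
  simp

-- ===== B-side lemmas: the index mapping equals the chunk form =====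

theorem window_eq (l : List Char) {k : Int} (hk : 0 < k) :
    (List.range (min (2*k).toNat l.length)).map (fun j : Nat => bChar l k (j : Int))
      = (l.take k.toNat).reverse ++ (l.drop k.toNat).take k.toNat := by
  have hw : ((2*k).toNat : Int) = 2*k := Int.toNat_of_nonneg (by omega)
  have hk' : (k.toNat : Int) = k := Int.toNat_of_nonneg (by omega)
  apply List.ext_getElem
  · simp only [List.length_map, List.length_range, List.length_append, List.length_reverse,
      List.length_take, List.length_drop]
    omega
  intro j h1 h2
  simp only [List.getElem_map, List.getElem_range]
  have hj : j < min (2*k).toNat l.length := by simpa using h1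
  have hjn : j < l.length := by omega
  have hjInt : (j : Int) < 2 * k := by omega
  have hr : PySem.Int.mod (j:Int) (2*k) = (j:Int) := by
    rw [PySem.Int.mod_eq_emod_of_pos (by omega)]
    exact Int.emod_eq_of_lt (by omega) hjInt
  simp only [bChar, hr]
  by_cases hlt : (j:Int) < k
  · rw [if_pos hlt]
    have hjk : j < k.toNat := by omega
    have hidx : (j:Int) - (j:Int) + min ((j:Int) - (j:Int) + k) (l.length:Int) - 1 - (j:Int)
        = ((min k.toNat l.length - 1 - j : Nat) : Int) := by
      push_cast
      omega
    rw [hidx, PySem.List.pyGetD_eq_getElem _ _ (by omega) (by push_cast; omega)]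
    rw [List.getElem_append_left (by simp [List.length_take]; omega)]
    rw [List.getElem_reverse]
    rw [List.getElem_take]
    congr 1
    simp only [List.length_take]
    omega
  · rw [if_neg hlt]
    have hjk : k.toNat ≤ j := by omega
    rw [PySem.List.pyGetD_eq_getElem _ _ (by omega) (by push_cast; omega)]
    have hlen1 : ((l.take k.toNat).reverse).length = k.toNat := by
      simp [List.length_take]; omega
    rw [List.getElem_append_right (by rw [hlen1]; omega)]
    rw [List.getElem_take, List.getElem_drop]
    congr 1
    rw [hlen1]
    omega

theorem bChar_shift (l : List Char) {k : Int} (hk : 0 < k) (j : Nat)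
    (hj : (2*k).toNat + j < l.length) :
    bChar l k (((2*k).toNat + j : Nat) : Int) = bChar (l.drop (2*k).toNat) k (j : Int) := by
  have hw : ((2*k).toNat : Int) = 2*k := Int.toNat_of_nonneg (by omega)
  have hnInt : (2*k) ≤ (l.length : Int) := by omega
  have hlen' : ((l.drop (2*k).toNat).length : Int) = (l.length : Int) - 2*k := by
    simp only [List.length_drop]
    omega
  have hmodshift : PySem.Int.mod (((2*k).toNat + j : Nat) : Int) (2*k)
      = PySem.Int.mod (j:Int) (2*k) := by
    rw [PySem.Int.mod_eq_emod_of_pos (by omega), PySem.Int.mod_eq_emod_of_pos (by omega)]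
    have : (((2*k).toNat + j : Nat) : Int) = (j:Int) + (2*k) * 1 := by push_cast; omega
    rw [this, Int.add_mul_emod_self_left]
  set r := PySem.Int.mod (j:Int) (2*k) with hr_def
  have hrb : 0 ≤ r ∧ r < 2*k := by
    rw [hr_def, PySem.Int.mod_eq_emod_of_pos (by omega)]
    exact ⟨Int.emod_nonneg _ (by omega), Int.emod_lt_of_pos _ (by omega)⟩
  have hrle : r ≤ (j:Int) := by
    have hq : 0 ≤ (j:Int) / (2*k) := Int.ediv_nonneg (by omega) (by omega)
    have hmul : 0 ≤ (2*k) * ((j:Int) / (2*k)) := mul_nonneg (by omega) hq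
    have : r = (j:Int) - (2*k) * ((j:Int) / (2*k)) := by
      rw [hr_def, PySem.Int.mod_eq_emod_of_pos (by omega), Int.emod_def]
    omega
  simp only [bChar, hmodshift, ← hr_def]
  by_cases hlt : r < k
  · rw [if_pos hlt, if_pos hlt]
    have hjInt : ((((2*k).toNat + j : Nat) : Int)) = (j:Int) + 2*k := by push_cast; omega
    have hjd : (j:Int) + 2*k < (l.length : Int) := by
      have := hj; push_cast at this ⊢; omega
    -- the two indices differ by 2*k
    have hidx : (((2*k).toNat + j : Nat) : Int) - r
          + min ((((2*k).toNat + j : Nat) : Int) - r + k) (l.length : Int) - 1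
          - (((2*k).toNat + j : Nat) : Int)
        = ((j:Int) - r + min ((j:Int) - r + k) ((l.drop (2*k).toNat).length : Int) - 1 - (j:Int))
          + 2*k := by
      rw [hjInt, hlen']
      omega
    rw [hidx]
    set idx := (j:Int) - r + min ((j:Int) - r + k) ((l.drop (2*k).toNat).length : Int) - 1 - (j:Int)
      with hidx_def
    have hjlt_e : (j:Int) < min ((j:Int) - r + k) ((l.drop (2*k).toNat).length : Int) := by
      rw [hlen']
      have := hj
      push_cast at this
      omega
    have hidxb : 0 ≤ idx ∧ idx < ((l.drop (2*k).toNat).length : Int) := by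
      rw [hidx_def]
      constructor <;> omega
    rw [PySem.List.pyGetD_eq_getElem _ _ (by omega) (by omega),
        PySem.List.pyGetD_eq_getElem _ _ (by omega) (by omega)]
    rw [List.getElem_drop]
    congr 1
    omega
  · rw [if_neg hlt, if_neg hlt]
    rw [PySem.List.pyGetD_eq_getElem _ _ (by omega) (by push_cast; omega),
        PySem.List.pyGetD_eq_getElem _ _ (by omega) (by rw [hlen']; push_cast; omega)]
    rw [List.getElem_drop]
    congr 1

theorem mapB_eq_goB : ∀ (N : Nat) (l : List Char) (k : Int), l.length ≤ N → 0 < k →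
    (List.range l.length).map (fun j : Nat => bChar l k (j:Int))
      = goB k l (PySem.List.pyRange 0 (l.length : Int) (2 * k)) := by
  intro N
  induction N with
  | zero =>
    intro l k hl hk
    have hnil : l = [] := List.length_eq_zero_iff.mp (by omega)
    subst hnil
    simp only [List.length_nil, Nat.cast_zero, List.range_zero, List.map_nil]
    rw [pyRange_pos_nil (by omega) le_rfl]
    rfl
  | succ N ih =>
    intro l k hl hk
    by_cases hn : l.length = 0
    · rw [hn]
      simp only [Nat.cast_zero, List.range_zero, List.map_nil]
      rw [pyRange_pos_nil (by omega) le_rfl]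
      rfl
    · have hnpos : (0 : Int) < (l.length : Int) := by exact_mod_cast Nat.pos_of_ne_zero hn
      set n : Int := (l.length : Int) with hn_def
      have h2k : (0:Int) < 2 * k := by omega
      have hw : ((2*k).toNat : Int) = 2*k := Int.toNat_of_nonneg (by omega)
      have hBr : PySem.List.pyRange 0 n (2 * k)
          = 0 :: (PySem.List.pyRange 0 (n - 2 * k) (2 * k)).map (· + 2 * k) := by
        rw [pyRange_pos_cons h2k hnpos]
        congr 1
        calc PySem.List.pyRange (0 + 2 * k) n (2 * k)
            = PySem.List.pyRange (0 + 2 * k) ((n - 2 * k) + 2 * k) (2 * k) := by ring_nf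
          _ = (PySem.List.pyRange 0 (n - 2 * k) (2 * k)).map (· + 2 * k) :=
              pyRange_shift (2 * k) h2k
      rw [hBr]
      simp only [goB, List.flatMap_cons]
      have hchunk0 : ((l.drop (0:Int).toNat).take k.toNat).reverse
            ++ (l.drop ((0:Int).toNat + k.toNat)).take k.toNat
          = (l.take k.toNat).reverse ++ (l.drop k.toNat).take k.toNat := by
        simp [Int.toNat_zero]
      by_cases hbig : (2*k).toNat < l.length
      · -- two or more windows: split range at 2k
        set l' : List Char := l.drop (2 * k).toNat with hl'_def
        have hlen' : l'.length = l.length - (2*k).toNat := by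
          rw [hl'_def, List.length_drop]
        have hsplit : l.length = (2*k).toNat + (l.length - (2*k).toNat) := by omega
        have hrangesplit : List.range l.length
            = List.range ((2*k).toNat) ++ (List.range (l.length - (2*k).toNat)).map
                (fun j => (2*k).toNat + j) := by
          conv_lhs => rw [hsplit]
          exact List.range_add
        rw [hrangesplit, List.map_append, List.map_map]
        have hfirst : (List.range ((2*k).toNat)).map (fun j : Nat => bChar l k (j:Int))
            = (l.take k.toNat).reverse ++ (l.drop k.toNat).take k.toNat := by
          have hmin : min (2*k).toNat l.length = (2*k).toNat := by omega
          have := window_eq l hk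
          rw [hmin] at this
          exact this
        have hsecond : (List.range (l.length - (2*k).toNat)).map
              ((fun j : Nat => bChar l k (j:Int)) ∘ (fun j => (2*k).toNat + j))
            = (List.range l'.length).map (fun j : Nat => bChar l' k (j:Int)) := by
          rw [hlen']
          apply List.map_congr_left
          intro j hj
          simp only [Function.comp_apply]
          have hjlt : (2*k).toNat + j < l.length := by
            simp only [List.mem_range] at hj
            omega
          exact_mod_cast bChar_shift l hk j hjlt
        have hgb := goB_shift k l (le_of_lt h2k) (PySem.List.pyRange 0 (n - 2*k) (2*k))
          (fun i hi => mem_pyRange_pos_nonneg h2k hi)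
        have hrange_eq : PySem.List.pyRange 0 (n - 2 * k) (2*k)
            = PySem.List.pyRange 0 (l'.length : Int) (2*k) := by
          have : (l'.length : Int) = n - 2 * k := by
            rw [hlen']; push_cast; omega
          rw [this]
        have hgoal : goB k l ((PySem.List.pyRange 0 (n - 2*k) (2*k)).map (· + 2 * k))
            = goB k l' (PySem.List.pyRange 0 (l'.length : Int) (2*k)) := by
          rw [hgb, ← hl'_def, hrange_eq]
        rw [hfirst, hsecond, hchunk0]
        congr 1
        rw [ih l' k (by omega) hk, ← hgoal]
        rfl
      · -- single (possibly partial) window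
        have hB2 : PySem.List.pyRange 0 (n - 2 * k) (2 * k) = [] :=
          pyRange_pos_nil h2k (by omega)
        rw [hB2]
        simp only [List.map_nil, List.flatMap_nil, List.append_nil]
        have hmin : min (2*k).toNat l.length = l.length := by omega
        have := window_eq l hk
        rw [hmin] at this
        rw [this, hchunk0]

theorem loopB_eq_map (l : List Char) (k : Int) :
    revStrLoopB l k = (List.range l.length).map (fun j : Nat => bChar l k (j:Int)) := by
  unfold revStrLoopB
  rw [PySem.List.foldl_append_singleton_eq_map]
  rw [PySem.List.pyRange_one, List.map_map]
  simp only [zero_add, Int.sub_zero, Int.toNat_natCast]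
  apply List.map_congr_left
  intro j _
  simp [Function.comp]

theorem revStr_eq (l : List Char) {k : Int} (hk : 0 < k) :
    revStrLoopA l k = revStrLoopB l k := by
  unfold revStrLoopA
  rw [foldA_eq l hk _ (fun i hi => mem_pyRange_pos_nonneg hk hi) [] 0]
  rw [List.nil_append]
  rw [main_lemma l.length l k (le_refl _) hk]
  rw [loopB_eq_map, mapB_eq_goB l.length l k (le_refl _) hk]

theorem revStrLoopA_neg (l : List Char) {k : Int} (hk : k < 0) : revStrLoopA l k = [] := by
  unfold revStrLoopA
  rw [pyRange_neg_zero_nil hk (by positivity)]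
  rfl

-- ===== VERDICT (by name: the statements are the Claim_ definitions above) =====
theorem reverseStr_spec : Claim_unchanged_reverseStr := by
  intro s k _
  unfold Spec_reverseStr
  intro hnD
  unfold reverseStr reverseStr_alt
  rcases lt_trichotomy k 0 with hneg | hz | hpos
  · have hs : s = "" := by
      by_contra hs
      exact hnD ⟨hneg, hs⟩
    subst hs
    rw [if_neg (by omega), if_pos (by omega)]
    rw [revStrLoopA_neg _ hneg]
  · subst hz
    simp
  · rw [if_neg (by omega), if_neg (by omega)]
    rw [revStr_eq s.toList hpos]

theorem reverseStr_changed : Claim_changed_reverseStr := by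
  unfold Claim_changed_reverseStr
  decide

theorem reverseStr_tight : Claim_exact_reverseStr := by
  intro s k _ hD
  obtain ⟨hk, hs⟩ := hD
  unfold reverseStr reverseStr_alt
  rw [if_neg (by omega), if_pos (by omega)]
  rw [revStrLoopA_neg _ hk]
  intro h
  exact hs (by simpa using h.symm)
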